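-- pv_equiv track=rewrite | github.com/ice-waves/suanfa | find_gold.py | findGold
-- ===== SOURCE A (Python) =====
-- def findGold(m: int, n: int, k: int) -> int:
--     goldWeight = 0
--     for x in range(m):
--         xAdd = sum([int(digit) for digit in str(x)])
--         for y in range(n):
--             yAdd = sum([int(digit) for digit in str(y)])
--             if xAdd + yAdd <= k:
--                 goldWeight += 1
--     return goldWeight
-- ===== SOURCE B (Python) =====
-- def findGold(m: int, n: int, k: int) -> int:
--     if m <= 0:
--         return 0
--     def ds(v):
--         return sum(int(c) for c in str(v))
--     # frequency table of digit sums over the y-range, plus their maximum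
--     cnt = {}
--     md = -1
--     for y in range(n):
--         d = ds(y)
--         cnt[d] = cnt.get(d, 0) + 1
--         if d > md:
--             md = d
--     total = 0
--     for x in range(m):
--         t = k - ds(x)
--         if t > md:
--             t = md
--         for s in range(t + 1):
--             total += cnt.get(s, 0)
--     return total
-- ===== Notes on version B (the rewrite author's own statement) =====
-- stated objective: faster
-- what changed: Instead of A's nested scan over all (x,y) pairs, B builds a digit-sum frequency dictionary (and max digit sum) over range(n) in one pass, then for each x adds the count of y-digit-sums up to k-ds(x) by summing at most md+1 dictionary entries.
import Mathlib
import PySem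

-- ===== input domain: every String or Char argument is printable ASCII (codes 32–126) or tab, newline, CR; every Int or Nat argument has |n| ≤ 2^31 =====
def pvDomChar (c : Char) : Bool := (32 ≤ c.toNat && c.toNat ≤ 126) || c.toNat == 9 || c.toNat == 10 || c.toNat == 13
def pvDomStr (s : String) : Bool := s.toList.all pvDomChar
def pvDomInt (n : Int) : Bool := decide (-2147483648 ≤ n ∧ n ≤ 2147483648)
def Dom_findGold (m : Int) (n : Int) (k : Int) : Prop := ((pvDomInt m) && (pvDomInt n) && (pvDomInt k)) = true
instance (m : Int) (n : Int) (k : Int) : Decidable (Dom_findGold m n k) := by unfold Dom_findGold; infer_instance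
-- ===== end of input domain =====

-- B replaces A's O(m·n) double scan by a digit-sum frequency table over the y-range
-- combined per x with a bounded prefix count (objective: faster, asymptotic).

-- ===== PORT A =====
-- int(digit) on a single character of str(x); .getD 0 is never reached for the digits
-- of str(x) with x ≥ 0, which is the only way both Pythons call it (x, y from range).
def pvDigitVal (c : Char) : Int := (PySem.Int.ofStr? (String.ofList [c])).getD 0

-- sum([int(digit) for digit in str(x)]) — shared verbatim by A and by B's helper ds
def pvDsum (x : Int) : Int :=
  (((PySem.Int.toStr x).toList).map (fun c => pvDigitVal c)).foldl (· + ·) 0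

def findGold (m : Int) (n : Int) (k : Int) : Int :=
  (PySem.List.pyRange 0 m 1).foldl (fun goldWeight x =>
    let xAdd := pvDsum x
    (PySem.List.pyRange 0 n 1).foldl (fun gw y =>
      let yAdd := pvDsum y
      if xAdd + yAdd ≤ k then gw + 1 else gw) goldWeight) 0

-- ===== PORT B =====
def findGold_alt (m : Int) (n : Int) (k : Int) : Int :=
  if m ≤ 0 then 0 else
  let p := (PySem.List.pyRange 0 n 1).foldl
    (fun (p : PySem.Dict Int Int × Int) y =>
      let d := pvDsum y
      (p.1.insert d (p.1.getD d 0 + 1), if d > p.2 then d else p.2))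
    (PySem.Dict.empty, -1)
  let cnt := p.1
  let md := p.2
  (PySem.List.pyRange 0 m 1).foldl (fun total x =>
    let t0 := k - pvDsum x
    let t := if t0 > md then md else t0
    (PySem.List.pyRange 0 (t + 1) 1).foldl (fun tot s => tot + cnt.getD s 0) total) 0

-- ===== PRECONDITION & SPEC =====
def Spec_findGold (m : Int) (n : Int) (k : Int) (out : Int) : Prop := out = findGold_alt m n k
instance (m : Int) (n : Int) (k : Int) (out : Int) : Decidable (Spec_findGold m n k out) := by unfold Spec_findGold; infer_instance

-- ===== CLAIM (what is proved, stated in full; the proofs are below) =====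
def Claim_equal_findGold : Prop := ∀ (m : Int) (n : Int) (k : Int), Dom_findGold m n k → Spec_findGold m n k (findGold m n k)

-- ===== LEMMAS AND PROOFS =====

theorem pvDigitVal_nonneg (c : Char) : 0 ≤ pvDigitVal c := by
  unfold pvDigitVal
  by_cases hc : c = '-'
  · subst hc; decide
  · simp only [PySem.Int.ofStr?, PySem.Int.ofChars?, String.toList_ofList]
    split
    · rename_i ds h
      exfalso
      apply hc
      have hm : '-' ∈ (List.dropWhile PySem.Int.isIntSpace
          (List.dropWhile PySem.Int.isIntSpace [c]).reverse).reverse := by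
        rw [h]; exact List.mem_cons_self
      have h1 := List.mem_reverse.mp hm
      have h2 := (List.dropWhile_sublist _).subset h1
      have h3 := List.mem_reverse.mp h2
      have h4 := (List.dropWhile_sublist (l := [c]) _).subset h3
      exact (List.mem_singleton.mp h4).symm
    · rename_i ds h
      have hgen : ∀ (X : Option Nat),
          0 ≤ ((Option.map (fun n : Int => n) (do let a ← X; pure ((a : Int)))).getD 0) := by
        intro X; cases X <;> simp
      exact hgen _
    · have hgen : ∀ (X : Option Nat),
          0 ≤ ((Option.map (fun n : Int => n) (do let a ← X; pure ((a : Int)))).getD 0) := by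
        intro X; cases X <;> simp
      exact hgen _

theorem pvDsum_nonneg (x : Int) : 0 ≤ pvDsum x := by
  unfold pvDsum
  rw [show (fun (acc v : Int) => acc + v) = (fun acc v => acc + id v) from rfl,
      PySem.List.foldl_add]
  simp only [List.map_id, zero_add]
  exact List.sum_nonneg (by
    intro v hv
    obtain ⟨c, _, rfl⟩ := List.mem_map.mp hv
    exact pvDigitVal_nonneg c)

-- a pair-state fold whose components do not interact splits into two folds
theorem foldl_pair_split {α β γ : Type} (l : List α) (g : β → α → β) (h : γ → α → γ)
    (a : β) (b : γ) :
    l.foldl (fun p y => (g p.1 y, h p.2 y)) (a, b) = (l.foldl g a, l.foldl h b) := by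
  induction l generalizing a b with
  | nil => rfl
  | cons y ys ih => simpa using ih (g a y) (h b y)

-- the running maximum bounds every f y in the list
theorem foldl_max_le_self (f : Int → Int) (l : List Int) :
    ∀ b : Int, b ≤ l.foldl (fun md y => if f y > md then f y else md) b := by
  induction l with
  | nil => intro b; exact le_refl b
  | cons w ws ihw =>
    intro b
    refine le_trans ?_ (ihw (if f w > b then f w else b))
    split <;> omega

theorem foldl_max_bound (f : Int → Int) (l : List Int) (b : Int) :
    ∀ y ∈ l, f y ≤ l.foldl (fun md y => if f y > md then f y else md) b := by
  induction l generalizing b with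
  | nil => intro y hy; cases hy
  | cons z zs ih =>
    intro y hy
    cases hy with
    | head =>
      simp only [List.foldl_cons]
      refine le_trans ?_ (foldl_max_le_self f zs (if f z > b then f z else b))
      split <;> omega
    | tail _ hy => exact ih (if f z > b then f z else b) y hy

-- summing per-value counts over range(t+1) gives the prefix count (values are ≥ 0)
theorem sum_count_range (ys : List Int) (hnn : ∀ v ∈ ys, 0 ≤ v) (t : Int) :
    ((PySem.List.pyRange 0 (t + 1) 1).map (fun s => (ys.count s : Int))).sum
      = (ys.countP (fun v => decide (v ≤ t)) : Int) := by
  induction ys with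
  | nil =>
    simp [List.count_nil]
  | cons v vs ih =>
    have hv : 0 ≤ v := hnn v List.mem_cons_self
    have hvs : ∀ w ∈ vs, 0 ≤ w := fun w hw => hnn w (List.mem_cons_of_mem _ hw)
    have hsplit : (fun s => ((v :: vs).count s : Int))
        = fun s => (vs.count s : Int) + (if s == v then 1 else 0) := by
      funext s
      by_cases hsv : s = v
      · simp [hsv]
      · simp [hsv, Ne.symm hsv]
    rw [hsplit, PySem.List.sum_map_add_int, ih hvs, PySem.List.sum_map_ite_one_zero]
    have hc : ((PySem.List.pyRange 0 (t + 1) 1).countP fun s => s == v)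
        = (PySem.List.pyRange 0 (t + 1) 1).count v := rfl
    rw [hc]
    have hcnt : (PySem.List.pyRange 0 (t + 1) 1).count v = if v ≤ t then 1 else 0 := by
      by_cases hvt : v ≤ t
      · rw [if_pos hvt]
        exact List.count_eq_one_of_mem (PySem.List.nodup_pyRange_one 0 (t + 1))
          (PySem.List.mem_pyRange_one.mpr ⟨hv, by omega⟩)
      · rw [if_neg hvt]
        refine List.count_eq_zero.mpr (fun hmem => ?_)
        have := PySem.List.mem_pyRange_one.mp hmem
        omega
    rw [hcnt, List.countP_cons]
    by_cases hvt : v ≤ t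
    · simp [hvt]
    · simp [hvt]

-- A's inner loop counts
theorem foldl_if_count (l : List Int) (p : Int → Prop) [DecidablePred p] (a : Int) :
    l.foldl (fun gw y => if p y then gw + 1 else gw) a
      = a + (l.countP (fun y => decide (p y)) : Int) := by
  induction l generalizing a with
  | nil => simp
  | cons y ys ih =>
    simp only [List.foldl_cons, List.countP_cons, ih]
    by_cases hp : p y
    · simp only [if_pos hp, decide_eq_true (by exact hp)]
      push_cast
      ring
    · simp [hp]

theorem findGold_spec_aux (m n k : Int) : findGold m n k = findGold_alt m n k := by
  unfold findGold findGold_alt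
  by_cases hm : m ≤ 0
  · rw [if_pos hm, PySem.List.pyRange_one_eq_nil hm]
    rfl
  rw [if_neg hm]
  simp only
  have hps : (PySem.List.pyRange 0 n 1).foldl
      (fun (p : PySem.Dict Int Int × Int) y =>
        (p.1.insert (pvDsum y) (p.1.getD (pvDsum y) 0 + 1),
          if pvDsum y > p.2 then pvDsum y else p.2))
      (PySem.Dict.empty, -1)
      = ((PySem.List.pyRange 0 n 1).foldl
          (fun (d : PySem.Dict Int Int) y => d.insert (pvDsum y) (d.getD (pvDsum y) 0 + 1))
          PySem.Dict.empty,
        (PySem.List.pyRange 0 n 1).foldl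
          (fun md y => if pvDsum y > md then pvDsum y else md) (-1)) :=
    foldl_pair_split (PySem.List.pyRange 0 n 1)
      (fun (d : PySem.Dict Int Int) y => d.insert (pvDsum y) (d.getD (pvDsum y) 0 + 1))
      (fun md y => if pvDsum y > md then pvDsum y else md) PySem.Dict.empty (-1)
  rw [hps]
  set Rn := PySem.List.pyRange 0 n 1 with hRn
  set ys := Rn.map pvDsum with hys
  set cnt := Rn.foldl
    (fun (d : PySem.Dict Int Int) y => d.insert (pvDsum y) (d.getD (pvDsum y) 0 + 1))
    PySem.Dict.empty with hcntd
  set md := Rn.foldl (fun md y => if pvDsum y > md then pvDsum y else md) (-1) with hmd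
  have hynn : ∀ v ∈ ys, 0 ≤ v := by
    intro v hv
    obtain ⟨y, _, rfl⟩ := List.mem_map.mp hv
    exact pvDsum_nonneg y
  have hymd : ∀ v ∈ ys, v ≤ md := by
    intro v hv
    obtain ⟨y, hy, rfl⟩ := List.mem_map.mp hv
    exact foldl_max_bound pvDsum Rn (-1) y hy
  have hcnt : ∀ s : Int, cnt.getD s 0 = (ys.count s : Int) := by
    intro s
    have h2 : (Rn.map pvDsum).foldl
        (fun (d : PySem.Dict Int Int) x => d.insert x (d.getD x 0 + 1)) PySem.Dict.empty
        = Rn.foldl (fun (d : PySem.Dict Int Int) y =>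
            d.insert (pvDsum y) (d.getD (pvDsum y) 0 + 1)) PySem.Dict.empty := by
      rw [List.foldl_map]
    rw [hcntd, hys, ← h2, PySem.Dict.getD_foldl_insert_add_one]
    simp
  apply PySem.List.foldl_congr_mem
  intro acc x _
  simp only
  rw [foldl_if_count]
  have hBsum : ∀ t : Int,
      (PySem.List.pyRange 0 (t + 1) 1).foldl (fun tot s => tot + cnt.getD s 0) acc
      = acc + (ys.countP (fun v => decide (v ≤ t)) : Int) := by
    intro t
    rw [PySem.List.foldl_add]
    congr 1
    rw [List.map_congr_left (fun s _ => hcnt s)]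
    exact sum_count_range ys hynn t
  rw [hBsum]
  congr 1
  have hAcount : Rn.countP (fun y => decide (pvDsum x + pvDsum y ≤ k))
      = ys.countP (fun v => decide (v ≤ k - pvDsum x)) := by
    rw [hys, List.countP_map]
    apply List.countP_congr
    intro y _
    simp only [Function.comp_apply, decide_eq_true_eq]
    omega
  rw [hAcount]
  by_cases hbig : k - pvDsum x > md
  · rw [if_pos hbig]
    congr 1
    apply List.countP_congr
    intro v hv
    have h1 := hymd v hv
    simp only [decide_eq_true_eq]
    omega
  · rw [if_neg hbig]

-- ===== VERDICT (by name: the statement is the Claim_ definition above) =====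
theorem findGold_spec : Claim_equal_findGold := by
  intro m n k _
  unfold Spec_findGold
  exact findGold_spec_aux m n k
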